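-- pv_equiv track=rewrite | github.com/Michaelx618/moonlet | ai_shell/agent.py | _build_symbol_subtask_line
-- ===== SOURCE A (Python) =====
-- def _build_symbol_subtask_line(user_text: str, symbol_name: str) -> str:
--     lines = [ln.strip() for ln in (user_text or "").splitlines() if ln.strip()]
--     if not lines:
--         return f"Update `{symbol_name}` per request."
--     low_name = (symbol_name or "").strip().lower()
--     for ln in lines:
--         low = ln.lower()
--         if low_name and low_name in low:
--             return ln[:220]
--     for ln in lines:
--         low = ln.lower()
--         if any(tok in low for tok in ("fix", "update", "change", "add", "remove", "refactor", "implement")):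
--             return ln[:220]
--     return lines[0][:220]
-- ===== SOURCE B (Python) =====
-- _TOKENS = ("fix", "update", "change", "add", "remove", "refactor", "implement")
--
-- def _build_symbol_subtask_line(user_text: str, symbol_name: str) -> str:
--     lines = [ln.strip() for ln in (user_text or "").splitlines() if ln.strip()]
--     if not lines:
--         return f"Update `{symbol_name}` per request."
--     low_name = (symbol_name or "").strip().lower()
--     # single backward pass: overwriting while walking back-to-front leaves the
--     # FIRST symbol-matching line in `sym` and the FIRST keyword line in `kw`
--     sym = kw = None
--     for ln in reversed(lines):
--         low = ln.lower()
--         if low_name and low_name in low: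
--             sym = ln
--         if any(t in low for t in _TOKENS):
--             kw = ln
--     chosen = sym if sym is not None else kw if kw is not None else lines[0]
--     return chosen[:220]
-- ===== Notes on version B (the rewrite author's own statement) =====
-- stated objective: alternative
-- what changed: Replaces A's two early-return forward scans with one backward pass that overwrites two accumulators (first symbol line, first keyword line) and selects between them after the loop.
import Mathlib
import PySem

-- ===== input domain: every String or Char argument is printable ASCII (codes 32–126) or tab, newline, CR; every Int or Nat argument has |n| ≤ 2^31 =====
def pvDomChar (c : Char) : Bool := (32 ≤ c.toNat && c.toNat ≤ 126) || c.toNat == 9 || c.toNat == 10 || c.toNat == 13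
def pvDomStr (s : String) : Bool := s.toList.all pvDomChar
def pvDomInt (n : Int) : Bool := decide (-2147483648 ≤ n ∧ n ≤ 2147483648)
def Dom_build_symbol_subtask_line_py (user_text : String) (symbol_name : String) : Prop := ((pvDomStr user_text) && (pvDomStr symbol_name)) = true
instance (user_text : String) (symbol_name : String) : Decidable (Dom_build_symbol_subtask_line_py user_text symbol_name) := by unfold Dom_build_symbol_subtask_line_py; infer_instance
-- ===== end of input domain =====

-- B makes ONE backward pass overwriting two accumulators instead of A's two early-return forward scans; same result.

-- shared constant: the action-token tuple both Pythons use
def pvToks : List String := ["fix", "update", "change", "add", "remove", "refactor", "implement"]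

-- ===== PORT A =====
-- first scan: 'for ln in lines: if low_name and low_name in low: return ln[:220]'
def pvA_loop1 (low_name : String) : List String → Option String
  | [] => none
  | ln :: rest =>
    let low := PySem.Str.lower ln
    if low_name ≠ "" ∧ PySem.Str.isIn low_name low then some (PySem.Str.slice ln none (some 220))
    else pvA_loop1 low_name rest

-- second scan: 'for ln in lines: if any(tok in low for tok in (...)): return ln[:220]'
def pvA_loop2 : List String → Option String
  | [] => none
  | ln :: rest =>
    let low := PySem.Str.lower ln
    if pvToks.any (fun tok => PySem.Str.isIn tok low) then some (PySem.Str.slice ln none (some 220))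
    else pvA_loop2 rest

def build_symbol_subtask_line_py (user_text : String) (symbol_name : String) : String :=
  match ((PySem.Str.splitlines user_text).map PySem.Str.strip).filter (fun l => l ≠ "") with
  | [] => "Update `" ++ symbol_name ++ "` per request."
  | l0 :: rest =>
    let low_name := PySem.Str.lower (PySem.Str.strip symbol_name)
    match pvA_loop1 low_name (l0 :: rest) with
    | some r => r
    | none =>
      match pvA_loop2 (l0 :: rest) with
      | some r => r
      | none => PySem.Str.slice l0 none (some 220)

-- ===== PORT B =====
-- one body of B's backward loop: overwrite the (sym, kw) accumulator pair
def pvB_step (low_name : String) (acc : Option String × Option String) (ln : String) : Option String × Option String :=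
  let low := PySem.Str.lower ln
  ((if low_name ≠ "" ∧ PySem.Str.isIn low_name low then some ln else acc.1),
   (if pvToks.any (fun t => PySem.Str.isIn t low) then some ln else acc.2))

def build_symbol_subtask_line_py_alt (user_text : String) (symbol_name : String) : String :=
  match ((PySem.Str.splitlines user_text).map PySem.Str.strip).filter (fun l => l ≠ "") with
  | [] => "Update `" ++ symbol_name ++ "` per request."
  | l0 :: rest =>
    let low_name := PySem.Str.lower (PySem.Str.strip symbol_name)
    let p := (List.reverse (l0 :: rest)).foldl (pvB_step low_name) (none, none)
    PySem.Str.slice (p.1.getD (p.2.getD l0)) none (some 220)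

-- ===== PRECONDITION & SPEC =====
def Spec_build_symbol_subtask_line_py (user_text : String) (symbol_name : String) (out : String) : Prop := out = build_symbol_subtask_line_py_alt user_text symbol_name
instance (user_text : String) (symbol_name : String) (out : String) : Decidable (Spec_build_symbol_subtask_line_py user_text symbol_name out) := by unfold Spec_build_symbol_subtask_line_py; infer_instance

-- ===== CLAIM (what is proved, stated in full; the proofs are below) =====
def Claim_equal_build_symbol_subtask_line_py : Prop := ∀ (user_text : String) (symbol_name : String), Dom_build_symbol_subtask_line_py user_text symbol_name → Spec_build_symbol_subtask_line_py user_text symbol_name (build_symbol_subtask_line_py user_text symbol_name)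

-- ===== LEMMAS AND PROOFS =====

-- folding B's step over the REVERSED list processes the head LAST (so the head's overwrite wins)
theorem pvB_fold_cons (low_name ln : String) (rest : List String) :
    (List.reverse (ln :: rest)).foldl (pvB_step low_name) (none, none) =
      pvB_step low_name ((List.reverse rest).foldl (pvB_step low_name) (none, none)) ln := by
  simp [List.reverse_cons, List.foldl_append]

-- the first component of B's accumulator is A's first scan, up to the [:220] slice
theorem pvB_fst (low_name : String) (lines : List String) :
    (((List.reverse lines).foldl (pvB_step low_name) (none, none)).1).map
        (fun s => PySem.Str.slice s none (some 220)) = pvA_loop1 low_name lines := by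
  induction lines with
  | nil => rfl
  | cons ln rest ih =>
    rw [pvB_fold_cons]
    simp only [pvB_step, pvA_loop1]
    by_cases h : low_name ≠ "" ∧ PySem.Str.isIn low_name (PySem.Str.lower ln) = true
    · rw [if_pos h, if_pos h, Option.map_some]
    · rw [if_neg h, if_neg h]; exact ih

-- the second component of B's accumulator is A's second scan, up to the [:220] slice
theorem pvB_snd (low_name : String) (lines : List String) :
    (((List.reverse lines).foldl (pvB_step low_name) (none, none)).2).map
        (fun s => PySem.Str.slice s none (some 220)) = pvA_loop2 lines := by
  induction lines with
  | nil => rfl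
  | cons ln rest ih =>
    rw [pvB_fold_cons]
    simp only [pvB_step, pvA_loop2]
    by_cases h : (pvToks.any fun t => PySem.Str.isIn t (PySem.Str.lower ln)) = true
    · rw [if_pos h, if_pos h, Option.map_some]
    · rw [if_neg h, if_neg h]; exact ih

-- ===== VERDICT (by name: the statement is the Claim_ definition above) =====
theorem build_symbol_subtask_line_py_spec : Claim_equal_build_symbol_subtask_line_py := by
  intro user_text symbol_name _
  unfold Spec_build_symbol_subtask_line_py build_symbol_subtask_line_py build_symbol_subtask_line_py_alt
  cases hl : ((PySem.Str.splitlines user_text).map PySem.Str.strip).filter (fun l => l ≠ "") with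
  | nil => rfl
  | cons l0 rest =>
    simp only
    rw [← pvB_fst (PySem.Str.lower (PySem.Str.strip symbol_name)) (l0 :: rest),
        ← pvB_snd (PySem.Str.lower (PySem.Str.strip symbol_name)) (l0 :: rest)]
    cases ((List.reverse (l0 :: rest)).foldl (pvB_step (PySem.Str.lower (PySem.Str.strip symbol_name))) (none, none)) with
    | mk s k => cases s <;> cases k <;> simp [Option.getD]
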